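-- pv_equiv track=rewrite | github.com/ytsaurus/ytsaurus | yt/yt/experiments/public/new_stress_test/lib/parser.py | parse_human_int
-- ===== SOURCE A (Python) =====
-- def parse_human_int(value):
--     suffixes = [
--         ("T", 2**40),
--         ("G", 2**30),
--         ("M", 2**20),
--         ("K", 2**10),
--         ("", 1)
--     ]
--     for suffix, multiplier in suffixes:
--         if value.endswith(suffix):
--             if suffix:
--                 value = value[:-len(suffix)]
--             return int(value) * multiplier
-- ===== SOURCE B (Python) =====
-- def parse_human_int(value):
--     # Recursive ladder: repeatedly downgrade the unit suffix one step
--     # (T->G->M->K->none), multiplying by 1024 per step; no multiplier table.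
--     downgrade = {"T": "G", "G": "M", "M": "K", "K": ""}
--     if value and value[-1] in downgrade:
--         return 1024 * parse_human_int(value[:-1] + downgrade[value[-1]])
--     return int(value)
-- ===== Notes on version B (the rewrite author's own statement) =====
-- stated objective: alternative
-- what changed: Replaces A's sequential scan over a (suffix, multiplier) table by a recursive ladder with no multiplier constants: the trailing unit letter is downgraded one step per call (T->G->M->K->none) and the result is multiplied by 1024 per recursion level.
import Mathlib
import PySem

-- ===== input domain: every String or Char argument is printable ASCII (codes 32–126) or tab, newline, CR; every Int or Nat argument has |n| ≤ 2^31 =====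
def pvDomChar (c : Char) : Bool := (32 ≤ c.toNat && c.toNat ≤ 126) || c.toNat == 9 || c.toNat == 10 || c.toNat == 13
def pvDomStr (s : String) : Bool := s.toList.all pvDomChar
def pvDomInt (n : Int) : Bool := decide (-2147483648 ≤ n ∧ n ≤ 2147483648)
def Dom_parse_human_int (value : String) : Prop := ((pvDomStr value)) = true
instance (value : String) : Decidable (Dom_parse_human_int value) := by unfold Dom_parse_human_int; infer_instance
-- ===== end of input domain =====

-- B replaces A's suffix-table scan by a recursive ladder: the trailing unit is downgraded one
-- step per call (T->G->M->K->none) and the multiplier accumulates as 1024 per step (objective: alternative).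
-- ===== PORT A =====
def pvSuffixes : List (String × Int) :=
  [("T", 2^40), ("G", 2^30), ("M", 2^20), ("K", 2^10), ("", 1)]

-- the 'for suffix, multiplier in suffixes' loop; int() = PySem.Int.ofStr? (none = ValueError, excluded by Pre_)
def pvLoopA : List (String × Int) → String → Int
  | [], _ => 0   -- unreachable: the "" suffix always matches
  | (suffix, mult) :: rest, value =>
    if PySem.Str.endswith value suffix then
      if suffix ≠ "" then
        (PySem.Int.ofStr? (PySem.Str.slice value none (some (-(PySem.Str.len suffix))))).getD 0 * mult
      else
        (PySem.Int.ofStr? value).getD 0 * mult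
    else pvLoopA rest value

def parse_human_int (value : String) : Int := pvLoopA pvSuffixes value

-- ===== PORT B =====
def pvDowngrade : PySem.Dict Char String :=
  PySem.Dict.ofList [('T', "G"), ('G', "M"), ('M', "K"), ('K', "")]

-- termination measure for the ladder: total suffix weight of the characters
def pvRank (c : Char) : Nat :=
  if c = 'T' then 4 else if c = 'G' then 3 else if c = 'M' then 2 else if c = 'K' then 1 else 0

theorem pvDowngrade_rank (c : Char) (d : String) (h : pvDowngrade.get? c = some d) :
    (d.toList.map pvRank).sum + 1 = pvRank c := by
  by_cases hT : c = 'T'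
  · subst hT; simp only [show pvDowngrade.get? 'T' = some "G" from by decide] at h
    cases h; decide
  · by_cases hG : c = 'G'
    · subst hG; simp only [show pvDowngrade.get? 'G' = some "M" from by decide] at h
      cases h; decide
    · by_cases hM : c = 'M'
      · subst hM; simp only [show pvDowngrade.get? 'M' = some "K" from by decide] at h
        cases h; decide
      · by_cases hK : c = 'K'
        · subst hK; simp only [show pvDowngrade.get? 'K' = some "" from by decide] at h
          cases h; decide
        · exfalso
          have : pvDowngrade.get? c = none := by
            simp [pvDowngrade, PySem.Dict.ofList, PySem.Dict.get?, PySem.Dict.update,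
              PySem.Dict.empty, PySem.Dict.insert]
            exact ⟨fun h => hT h.symm, fun h => hG h.symm, fun h => hM h.symm, fun h => hK h.symm⟩
          rw [this] at h; cases h

-- the recursive body of B over the characters; cs.dropLast is value[:-1] (exact: Python's
-- value[:-1] drops the last character, and is [] on the empty string like dropLast)
def pvAltGo (cs : List Char) : Int :=
  match hg : PySem.Chars.pyGet? cs (-1) with          -- 'value and value[-1]': none exactly when cs = []
  | some c =>
    match hd : pvDowngrade.get? c with                -- 'value[-1] in downgrade'
    | some d => 1024 * pvAltGo (cs.dropLast ++ d.toList)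
    | none => (PySem.Int.ofChars? cs).getD 0
  | none => (PySem.Int.ofChars? cs).getD 0
termination_by (cs.map pvRank).sum
decreasing_by
  have hlast : cs.getLast? = some c := by
    simpa [PySem.Chars.pyGet?_eq_listPyGet?, PySem.List.pyGet?_neg_one] using hg
  have hcs : cs = cs.dropLast ++ [c] := (List.dropLast_append_getLast? c hlast).symm
  have hr := pvDowngrade_rank c d hd
  calc ((cs.dropLast ++ d.toList).map pvRank).sum
      = (cs.dropLast.map pvRank).sum + (d.toList.map pvRank).sum := by
        simp [List.map_append]
    _ < (cs.dropLast.map pvRank).sum + pvRank c := by omega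
    _ = (cs.map pvRank).sum := by
        conv_rhs => rw [hcs]
        simp [List.map_append]

def parse_human_int_alt (value : String) : Int := pvAltGo value.toList

-- ===== PRECONDITION & SPEC =====
-- Pre_ excludes exactly the inputs where A's int() raises ValueError: after dropping a trailing
-- T/G/M/K (if any), the remainder must parse as a Python int.  The second conjunct (the remainder
-- does not itself end in a suffix letter) is already implied by int-parsability of the remainder
-- (an int-parsable string cannot end in a letter); it is stated explicitly in closed form.
def Pre_parse_human_int (value : String) : Prop :=
  (PySem.Int.ofChars?
    (if value.toList.getLast?.any (fun c => c ∈ (['T','G','M','K'] : List Char))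
     then value.toList.dropLast else value.toList)).isSome = true
  ∧ (value.toList.getLast?.any (fun c => c ∈ (['T','G','M','K'] : List Char)) = true →
     value.toList.dropLast.getLast?.any (fun c => c ∈ (['T','G','M','K'] : List Char)) = false)
instance (value : String) : Decidable (Pre_parse_human_int value) := by
  unfold Pre_parse_human_int; infer_instance
def pvWitness_parse_human_int : String := "10K"

def Spec_parse_human_int (value : String) (out : Int) : Prop := out = parse_human_int_alt value
instance (value : String) (out : Int) : Decidable (Spec_parse_human_int value out) := by unfold Spec_parse_human_int; infer_instance

-- ===== CLAIM (what is proved, stated in full; the proofs are below) =====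
def Claim_equal_parse_human_int : Prop := ∀ (value : String), Dom_parse_human_int value → Pre_parse_human_int value → Spec_parse_human_int value (parse_human_int value)

-- ===== LEMMAS AND PROOFS =====
theorem pvEnds_true (xs : List Char) (c d : Char) (h : c = d) :
    PySem.Chars.endswith (xs ++ [c]) [d] = true := by
  rw [PySem.Chars.endswith_iff, h]; exact ⟨xs, rfl⟩

theorem pvEnds_false (xs : List Char) (c d : Char) (h : ¬ c = d) :
    PySem.Chars.endswith (xs ++ [c]) [d] = false := by
  rw [Bool.eq_false_iff]
  intro hb
  rcases (PySem.Chars.endswith_iff _ _).mp hb with ⟨t, ht⟩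
  have := congrArg List.getLast? ht
  simp at this
  exact h this.symm

theorem pvEnds_nil (cs : List Char) : PySem.Chars.endswith cs [] = true := by
  rw [PySem.Chars.endswith_iff]; exact List.nil_suffix

theorem pvEnds_nil_singleton (d : Char) :
    PySem.Chars.endswith ([] : List Char) [d] = false := by
  rw [Bool.eq_false_iff]
  intro hb
  rcases (PySem.Chars.endswith_iff _ _).mp hb with ⟨t, ht⟩
  simp at ht

theorem pvGetNone (c : Char) (h1 : ¬ c = 'T') (h2 : ¬ c = 'G') (h3 : ¬ c = 'M')
    (h4 : ¬ c = 'K') : pvDowngrade.get? c = none := by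
  simp [pvDowngrade, PySem.Dict.ofList, PySem.Dict.get?, PySem.Dict.update,
    PySem.Dict.empty, PySem.Dict.insert]
  exact ⟨fun h => h1 h.symm, fun h => h2 h.symm, fun h => h3 h.symm, fun h => h4 h.symm⟩

-- one ladder step of B
theorem pvAltGo_concat_suffix (xs : List Char) (c : Char) (d : String)
    (h : pvDowngrade.get? c = some d) :
    pvAltGo (xs ++ [c]) = 1024 * pvAltGo (xs ++ d.toList) := by
  have h1 : PySem.Chars.pyGet? (xs ++ [c]) (-1) = some c := by
    simp [PySem.Chars.pyGet?_eq_listPyGet?, PySem.List.pyGet?_neg_one_append_singleton]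
  rw [pvAltGo]
  split
  · rename_i c1 hg
    have hc : c = c1 := by
      have := h1.symm.trans hg
      exact Option.some.inj this
    subst hc
    split
    · rename_i d1 hd
      have hdd : d = d1 := by
        have := h.symm.trans hd
        exact Option.some.inj this
      subst hdd
      simp
    · rename_i hd
      rw [h] at hd; cases hd
  · rename_i hg
    rw [h1] at hg; cases hg

-- B stops when the last character is not a suffix letter
theorem pvAltGo_no_suffix (cs : List Char)
    (h : ∀ c, cs.getLast? = some c → pvDowngrade.get? c = none) :
    pvAltGo cs = (PySem.Int.ofChars? cs).getD 0 := by
  rw [pvAltGo]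
  split
  · rename_i c hg
    have hlast : cs.getLast? = some c := by
      simpa [PySem.Chars.pyGet?_eq_listPyGet?, PySem.List.pyGet?_neg_one] using hg
    split
    · rename_i d hd
      rw [h c hlast] at hd; cases hd
    · rfl
  · rfl


-- one ladder step per suffix letter, with the downgrade character made explicit
theorem pvLadder_T (xs : List Char) : pvAltGo (xs ++ ['T']) = 1024 * pvAltGo (xs ++ ['G']) := by
  simpa using pvAltGo_concat_suffix xs 'T' "G" (by decide)

theorem pvLadder_G (xs : List Char) : pvAltGo (xs ++ ['G']) = 1024 * pvAltGo (xs ++ ['M']) := by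
  simpa using pvAltGo_concat_suffix xs 'G' "M" (by decide)

theorem pvLadder_M (xs : List Char) : pvAltGo (xs ++ ['M']) = 1024 * pvAltGo (xs ++ ['K']) := by
  simpa using pvAltGo_concat_suffix xs 'M' "K" (by decide)

theorem pvLadder_K (xs : List Char) : pvAltGo (xs ++ ['K']) = 1024 * pvAltGo xs := by
  simpa using pvAltGo_concat_suffix xs 'K' "" (by decide)

-- B stops on a string whose last character is not a suffix letter
theorem pvStop (xs : List Char)
    (hany : xs.getLast?.any (fun c => c ∈ (['T','G','M','K'] : List Char)) = false) :
    pvAltGo xs = (PySem.Int.ofChars? xs).getD 0 := by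
  apply pvAltGo_no_suffix
  intro c hl
  rw [hl] at hany
  simp at hany
  exact pvGetNone c hany.1 hany.2.1 hany.2.2.1 hany.2.2.2

-- A's one-character slice value[:-1] is the remainder xs
theorem pvSliceA (value : String) (xs : List Char) (c : Char) (h : value.toList = xs ++ [c]) :
    PySem.Int.ofStr? (PySem.Str.slice value none (some (-1))) = PySem.Int.ofChars? xs := by
  simp [PySem.Int.ofStr?, PySem.Str.slice, h, pysem]

-- ===== VERDICT (by name: the statement is the Claim_ definition above) =====
theorem parse_human_int_spec : Claim_equal_parse_human_int := by
  intro value _ hpre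
  obtain ⟨hp1, hp2⟩ := hpre
  unfold Spec_parse_human_int parse_human_int parse_human_int_alt
  rcases List.eq_nil_or_concat value.toList with h | ⟨xs, c, h⟩
  · rw [h, pvStop [] (by decide)]
    simp [pvLoopA, pvSuffixes, PySem.Int.ofStr?, PySem.Str.endswith_eq, h, pvEnds_nil,
      pvEnds_nil_singleton,
      show ("T" : String).toList = ['T'] from by decide,
      show ("G" : String).toList = ['G'] from by decide,
      show ("M" : String).toList = ['M'] from by decide,
      show ("" : String).toList = [] from by decide,
      show ("K" : String).toList = ['K'] from by decide]
  · rw [List.concat_eq_append] at h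
    have hxs : value.toList.dropLast = xs := by rw [h]; simp
    by_cases hT : c = 'T'
    · subst hT
      have hstop := pvStop xs (by rw [← hxs]; exact hp2 (by rw [h]; simp))
      have hslice := pvSliceA value xs 'T' h
      simp [pvLoopA, pvSuffixes, PySem.Str.endswith_eq, h, pvEnds_true xs 'T' 'T' rfl,
        show ("T" : String).toList = ['T'] from by decide]
      rw [pvLadder_T, pvLadder_G, pvLadder_M, pvLadder_K, hstop, hslice]
      ring
    · by_cases hG : c = 'G'
      · subst hG
        have hstop := pvStop xs (by rw [← hxs]; exact hp2 (by rw [h]; simp))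
        have hslice := pvSliceA value xs 'G' h
        simp [pvLoopA, pvSuffixes, PySem.Str.endswith_eq, h, pvEnds_true xs 'G' 'G' rfl,
          pvEnds_false xs 'G' 'T' hT,
          show ("T" : String).toList = ['T'] from by decide,
          show ("G" : String).toList = ['G'] from by decide]
        rw [pvLadder_G, pvLadder_M, pvLadder_K, hstop, hslice]
        ring
      · by_cases hM : c = 'M'
        · subst hM
          have hstop := pvStop xs (by rw [← hxs]; exact hp2 (by rw [h]; simp))
          have hslice := pvSliceA value xs 'M' h
          simp [pvLoopA, pvSuffixes, PySem.Str.endswith_eq, h, pvEnds_true xs 'M' 'M' rfl,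
            pvEnds_false xs 'M' 'T' hT, pvEnds_false xs 'M' 'G' hG,
            show ("T" : String).toList = ['T'] from by decide,
            show ("G" : String).toList = ['G'] from by decide,
            show ("M" : String).toList = ['M'] from by decide]
          rw [pvLadder_M, pvLadder_K, hstop, hslice]
          ring
        · by_cases hK : c = 'K'
          · subst hK
            have hstop := pvStop xs (by rw [← hxs]; exact hp2 (by rw [h]; simp))
            have hslice := pvSliceA value xs 'K' h
            simp [pvLoopA, pvSuffixes, PySem.Str.endswith_eq, h, pvEnds_true xs 'K' 'K' rfl,
              pvEnds_false xs 'K' 'T' hT, pvEnds_false xs 'K' 'G' hG, pvEnds_false xs 'K' 'M' hM,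
              show ("T" : String).toList = ['T'] from by decide,
              show ("G" : String).toList = ['G'] from by decide,
              show ("M" : String).toList = ['M'] from by decide,
              show ("K" : String).toList = ['K'] from by decide]
            rw [pvLadder_K, hstop, hslice]
            ring
          · have hany : value.toList.getLast?.any
                (fun c => c ∈ (['T','G','M','K'] : List Char)) = false := by
              rw [h]; simp [hT, hG, hM, hK]
            rw [pvStop value.toList hany]
            simp [pvLoopA, pvSuffixes, PySem.Int.ofStr?, PySem.Str.endswith_eq, h, pvEnds_nil,
              pvEnds_false xs c 'T' hT, pvEnds_false xs c 'G' hG,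
              pvEnds_false xs c 'M' hM, pvEnds_false xs c 'K' hK,
              show ("T" : String).toList = ['T'] from by decide,
              show ("G" : String).toList = ['G'] from by decide,
              show ("M" : String).toList = ['M'] from by decide,
              show ("" : String).toList = [] from by decide,
              show ("K" : String).toList = ['K'] from by decide]
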